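-- pv_equiv track=rewrite | github.com/Tomaz12345/Catalan_gray | algorithms.py | num_ones_zeros
-- ===== SOURCE A (Python) =====
-- def num_ones_zeros(binary):
--     ones = 0
--     zeros = 0
--     for i, b in enumerate(binary):
--         if b == "1":
--             if zeros > 0:
--                 break
--             ones += 1
--         else:
--             zeros += 1
--     return ones, zeros
-- ===== SOURCE B (Python) =====
-- def num_ones_zeros(binary):
--     stripped = binary.lstrip("1")
--     ones = len(binary) - len(stripped)
--     idx = stripped.find("1")
--     zeros = len(stripped) if idx == -1 else idx
--     return ones, zeros
-- ===== Notes on version B (the rewrite author's own statement) =====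
-- stated objective: simpler
-- what changed: Replaces the single stateful break-loop with two declarative phases: lstrip measures the leading run of ones, then find measures the following run of non-ones.
import Mathlib
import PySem

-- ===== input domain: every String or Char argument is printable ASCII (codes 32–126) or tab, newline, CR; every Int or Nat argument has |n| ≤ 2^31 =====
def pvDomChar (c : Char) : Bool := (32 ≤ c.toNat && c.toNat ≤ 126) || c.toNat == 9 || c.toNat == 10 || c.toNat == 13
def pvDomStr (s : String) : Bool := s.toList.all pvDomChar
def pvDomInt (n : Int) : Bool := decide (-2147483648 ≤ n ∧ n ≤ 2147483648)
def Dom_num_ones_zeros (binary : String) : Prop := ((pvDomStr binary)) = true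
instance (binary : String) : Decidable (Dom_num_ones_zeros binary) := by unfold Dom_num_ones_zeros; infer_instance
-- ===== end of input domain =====

-- B: two declarative phases (strip leading ones, then find the next one) instead of A's single stateful break-loop; same cost, simpler.
-- ===== PORT A =====
-- the loop of A: enumerate's index i is unused by A's body, so the fold carries only (ones, zeros)
def numOZloop : List Char → Int → Int → Int × Int
  | [], ones, zeros => (ones, zeros)
  | b :: rest, ones, zeros =>
    if b == '1' then
      if zeros > 0 then (ones, zeros)
      else numOZloop rest (ones + 1) zeros
    else numOZloop rest ones (zeros + 1)

def num_ones_zeros (binary : String) : Int × Int := numOZloop binary.toList 0 0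

-- ===== PORT B =====
def num_ones_zeros_alt (binary : String) : Int × Int :=
  let cs := binary.toList
  let stripped := cs.dropWhile (fun c => c == '1')  -- binary.lstrip("1"): hand port, exact (the chars set is the single char '1')
  let ones : Int := (cs.length : Int) - (stripped.length : Int)
  let idx : Int := PySem.Chars.find stripped ['1']  -- stripped.find("1")
  let zeros : Int := if idx = -1 then ((stripped.length : Int)) else idx
  (ones, zeros)

-- ===== PRECONDITION & SPEC =====
def Spec_num_ones_zeros (binary : String) (out : Int × Int) : Prop := out = num_ones_zeros_alt binary
instance (binary : String) (out : Int × Int) : Decidable (Spec_num_ones_zeros binary out) := by unfold Spec_num_ones_zeros; infer_instance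

-- ===== CLAIM (what is proved, stated in full; the proofs are below) =====
def Claim_equal_num_ones_zeros : Prop := ∀ (binary : String), Dom_num_ones_zeros binary → Spec_num_ones_zeros binary (num_ones_zeros binary)

-- ===== LEMMAS AND PROOFS =====

-- ===== VERDICT (by name: the statement is the Claim_ definition above) =====
lemma tw_all_of_not_mem (cs : List Char) (h : '1' ∉ cs) :
    cs.takeWhile (fun c => !(c == '1')) = cs := by
  induction cs with
  | nil => rfl
  | cons c rest ih =>
    simp only [List.mem_cons, not_or] at h
    simp [List.takeWhile_cons, Ne.symm h.1, ih h.2]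

lemma go_one (cs : List Char) (k : Nat) :
    PySem.Chars.find.go ['1'] cs k =
      if '1' ∈ cs then (((k + (cs.takeWhile (fun c => !(c == '1'))).length : Nat)) : Int) else -1 := by
  induction cs generalizing k with
  | nil => simp [PySem.Chars.find.go]
  | cons c rest ih =>
    by_cases hc : c = '1'
    · subst hc
      simp [PySem.Chars.find.go, List.isPrefixOf]
    · have hpre : List.isPrefixOf ['1'] (c :: rest) = false := by
        simp [List.isPrefixOf, Ne.symm hc]
      simp only [PySem.Chars.find.go, hpre, Bool.false_eq_true, if_false, ih]
      by_cases hm : '1' ∈ rest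
      · have hb : (c == '1') = false := by simp [hc]
        simp only [List.mem_cons, hm, or_true, if_true, List.takeWhile_cons, hb,
          Bool.not_false, if_true, List.length_cons]
        push_cast; ring
      · simp [hm, Ne.symm hc]

lemma loop_zeros (cs : List Char) (ones zeros : Int) (h : 0 < zeros) :
    numOZloop cs ones zeros =
      (ones, zeros + ((cs.takeWhile (fun c => !(c == '1'))).length : Int)) := by
  induction cs generalizing zeros with
  | nil => simp [numOZloop]
  | cons c rest ih =>
    by_cases hc : c = '1'
    · subst hc; simp [numOZloop, h]
    · have hb : (c == '1') = false := by simp [hc]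
      simp only [numOZloop, hb, Bool.false_eq_true, if_false,
        ih (zeros + 1) (by omega), List.takeWhile_cons, Bool.not_false, if_true,
        List.length_cons, Prod.mk.injEq]
      constructor
      · trivial
      · push_cast; omega

lemma loop_ones (cs : List Char) (ones : Int) :
    numOZloop cs ones 0 =
      (ones + ((cs.takeWhile (fun c => c == '1')).length : Int),
       (((cs.dropWhile (fun c => c == '1')).takeWhile (fun c => !(c == '1'))).length : Int)) := by
  induction cs generalizing ones with
  | nil => simp [numOZloop]
  | cons c rest ih =>
    by_cases hc : c = '1'
    · subst hc
      simp only [numOZloop, beq_self_eq_true, if_true, lt_irrefl, if_false, ih (ones + 1),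
        List.takeWhile_cons, List.dropWhile_cons, decide_true, List.length_cons, Prod.mk.injEq]
      constructor
      · push_cast; ring
      · trivial
    · have hb : (c == '1') = false := by simp [hc]
      simp only [numOZloop, hb, Bool.false_eq_true, if_false,
        List.takeWhile_cons, List.dropWhile_cons, Bool.not_false, if_true,
        List.length_cons, List.length_nil, Prod.mk.injEq]
      rw [show ((0 : Int) + 1) = 1 by norm_num, loop_zeros rest ones 1 (by norm_num)]
      rw [Prod.mk.injEq]
      constructor
      · push_cast; ring
      · push_cast; ring

theorem num_ones_zeros_spec : Claim_equal_num_ones_zeros := by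
  intro binary _
  unfold Spec_num_ones_zeros num_ones_zeros num_ones_zeros_alt PySem.Chars.find
  set cs := binary.toList with hcs
  simp only []
  rw [loop_ones]
  set stripped := cs.dropWhile (fun c => c == '1') with hstr
  have hlen : (cs.takeWhile (fun c => c == '1')).length + stripped.length = cs.length := by
    rw [hstr, ← List.length_append, List.takeWhile_append_dropWhile]
  rw [go_one]
  by_cases hm : '1' ∈ stripped
  · have hne : (((0 + (stripped.takeWhile (fun c => !(c == '1'))).length : Nat)) : Int) ≠ -1 := by
      omega
    simp only [hm, if_true, hne, if_false, Prod.mk.injEq]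
    constructor
    · omega
    · push_cast; ring
  · simp only [hm, if_false, if_true]
    rw [tw_all_of_not_mem stripped hm]
    rw [Prod.mk.injEq]
    constructor
    · omega
    · rfl
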